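-- pv_equiv track=rewrite | github.com/Fan-Yang-284/CCC | 2018S/s4.py | getTrees
-- ===== SOURCE A (Python) =====
-- from math import floor
--
-- dp = {1:1,2:1} #memo
--
-- def getTrees(weight): # takes in number of subtrees, weight
--     if weight in dp:
--         return dp[weight]
--     half1 = weight//2
--     ans = weight-half1
--     for i in range(half1,1,-1):
--         ans += getTrees(floor(weight/i))
--     dp[weight] = ans
--     return ans
-- ===== SOURCE B (Python) =====
-- # Block-decomposition version: groups equal quotients weight//i, O(sqrt(w)) subproblems per call.
-- # Note: A mutates a module-level memo dict `dp`; B keeps its memo local (return value is the same).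
-- def getTrees(weight):
--     memo = {}
--     def count(w):
--         if w == 1 or w == 2:
--             return 1
--         if w in memo:
--             return memo[w]
--         half = w // 2
--         ans = w - half
--         i = 2
--         while i <= half:
--             q = w // i
--             j = min(half, w // q)
--             ans += (j - i + 1) * count(q)
--             i = j + 1
--         memo[w] = ans
--         return ans
--     return count(weight)
-- ===== Notes on version B (the rewrite author's own statement) =====
-- stated objective: faster
-- what changed: A makes one recursive call for every i in 2..weight//2; B groups the i with equal quotient weight//i into divisor blocks and adds block_size * getTrees(quotient) once per block, so each call does O(sqrt(weight)) work instead of O(weight).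
import Mathlib
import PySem

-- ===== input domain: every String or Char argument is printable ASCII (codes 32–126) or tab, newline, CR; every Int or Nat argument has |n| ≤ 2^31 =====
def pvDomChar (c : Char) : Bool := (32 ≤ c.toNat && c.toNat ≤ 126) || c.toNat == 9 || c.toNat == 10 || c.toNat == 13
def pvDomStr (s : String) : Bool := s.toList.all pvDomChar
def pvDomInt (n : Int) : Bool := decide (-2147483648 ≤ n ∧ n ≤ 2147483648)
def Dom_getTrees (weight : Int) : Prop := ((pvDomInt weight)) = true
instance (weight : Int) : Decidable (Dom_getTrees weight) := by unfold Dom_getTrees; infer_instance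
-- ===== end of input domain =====

-- B replaces A's per-index recursion (one recursive call for every i in 2..weight//2) by divisor-block
-- decomposition: equal quotients weight//i are grouped and counted once, O(sqrt(weight)) subproblems per call.
-- A mutates a module-level memo dict `dp`; this equivalence is about the return value only (B memoizes locally).

-- ===== PORT A =====
-- On the domain |weight| ≤ 2^31 and i ≥ 2, Python's floor(weight/i) equals weight//i exactly
-- (the float quotient has absolute error < 2^-22, too small to cross an integer), so it is
-- ported as PySem.Int.floordiv. The memo dict `dp` is a pure cache: it is ported as the
-- initial base cases {1:1, 2:1}; caching does not change the returned value.
mutual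
def getTrees (weight : Int) : Int :=
  if weight = 1 ∨ weight = 2 then 1    -- `if weight in dp` on the initial dp = {1:1,2:1}
  else
    let half1 := PySem.Int.floordiv weight 2
    getTreesLoopA weight half1 (weight - half1)
termination_by (weight.toNat, weight.toNat + 2)
decreasing_by
  · apply Prod.Lex.right
    have h1 : PySem.Int.floordiv weight 2 = weight / 2 := PySem.Int.floordiv_eq_ediv_of_pos (by omega)
    have h2 : weight / 2 ≤ weight ∨ weight < 0 := by
      by_cases h : 0 ≤ weight
      · exact Or.inl (Int.ediv_le_self 2 h)
      · exact Or.inr (by omega)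
    omega

-- `for i in range(half1, 1, -1): ans += getTrees(floor(weight/i))`, accumulator `ans = acc`
def getTreesLoopA (weight i acc : Int) : Int :=
  if 1 < i then
    getTreesLoopA weight (i - 1) (acc + getTrees (PySem.Int.floordiv weight i))
  else acc
termination_by (weight.toNat, i.toNat + 1)
decreasing_by
  · rename_i h
    have h1 : PySem.Int.floordiv weight i = weight / i := PySem.Int.floordiv_eq_ediv_of_pos (by omega)
    by_cases hw : weight ≤ 0
    · have h2 : weight / i ≤ 0 := by
        have := Int.ediv_le_ediv (show (0:Int) < i by omega) hw
        simpa using this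
      have h3 : weight.toNat = 0 := by omega
      have : (PySem.Int.floordiv weight i).toNat = 0 := by omega
      rw [h3, this]
      apply Prod.Lex.right
      omega
    · have hw' : 0 < weight := by omega
      have h2 : 0 ≤ weight / i := Int.ediv_nonneg (by omega) (by omega)
      have h3 : weight / i * i ≤ weight := Int.ediv_mul_le weight (by omega)
      have h4 : 2 * (weight / i) ≤ weight / i * i := by nlinarith
      apply Prod.Lex.left
      omega
  · apply Prod.Lex.right
    rename_i h
    omega
end

-- ===== PORT B =====
-- Port of Source B's `count`: the local memo is a pure cache and is ported away; the `while i <= half`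
-- loop becomes getTreesLoopB.  `2 ≤ i` is an invariant of B's loop (i starts at 2 and only grows);
-- the extra conjunct in the guard only makes the recursion total and never fires differently on B's runs.
mutual
def getTrees_alt (weight : Int) : Int :=
  if weight = 1 ∨ weight = 2 then 1
  else
    let half := PySem.Int.floordiv weight 2
    getTreesLoopB weight 2 (weight - half)
termination_by (weight.toNat, weight.toNat + 2)
decreasing_by
  · apply Prod.Lex.right
    have h1 : PySem.Int.floordiv weight 2 = weight / 2 := PySem.Int.floordiv_eq_ediv_of_pos (by omega)
    have h2 : weight / 2 ≤ weight ∨ weight < 0 := by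
      by_cases h : 0 ≤ weight
      · exact Or.inl (Int.ediv_le_self 2 h)
      · exact Or.inr (by omega)
    omega

def getTreesLoopB (weight i acc : Int) : Int :=
  if 2 ≤ i ∧ i ≤ PySem.Int.floordiv weight 2 then
    let q := PySem.Int.floordiv weight i
    let j := min (PySem.Int.floordiv weight 2) (PySem.Int.floordiv weight q)
    getTreesLoopB weight (j + 1) (acc + (j - i + 1) * getTrees_alt q)
  else acc
termination_by (weight.toNat, (PySem.Int.floordiv weight 2 - i + 2).toNat)
decreasing_by
  all_goals rename_i h
  · -- recursive call getTrees_alt (weight // i): the weight strictly drops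
    obtain ⟨h2i, hih⟩ := h
    have hh : PySem.Int.floordiv weight 2 = weight / 2 := PySem.Int.floordiv_eq_ediv_of_pos (by omega)
    have hq : PySem.Int.floordiv weight i = weight / i := PySem.Int.floordiv_eq_ediv_of_pos (by omega)
    have hw2 : weight / 2 * 2 ≤ weight := Int.ediv_mul_le weight (by omega)
    have hw4 : 4 ≤ weight := by omega
    have h2 : 0 ≤ weight / i := Int.ediv_nonneg (by omega) (by omega)
    have h3 : weight / i * i ≤ weight := Int.ediv_mul_le weight (by omega)
    have h4 : 2 * (weight / i) ≤ weight / i * i := by nlinarith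
    apply Prod.Lex.left
    omega
  · -- the loop itself: i jumps to j + 1 > i
    obtain ⟨h2i, hih⟩ := h
    have hh : PySem.Int.floordiv weight 2 = weight / 2 := PySem.Int.floordiv_eq_ediv_of_pos (by omega)
    have hq : PySem.Int.floordiv weight i = weight / i := PySem.Int.floordiv_eq_ediv_of_pos (by omega)
    have hw2 : weight / 2 * 2 ≤ weight := Int.ediv_mul_le weight (by omega)
    have hw4 : 4 ≤ weight := by omega
    have hq2 : 2 ≤ weight / i := by
      rw [Int.le_ediv_iff_mul_le (by omega)]
      omega
    have hqd : PySem.Int.floordiv weight (weight / i) = weight / (weight / i) :=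
      PySem.Int.floordiv_eq_ediv_of_pos (by omega)
    have hji : i ≤ weight / (weight / i) := by
      rw [Int.le_ediv_iff_mul_le (by omega)]
      have := Int.ediv_mul_le weight (show i ≠ 0 by omega)
      nlinarith [Int.ediv_mul_le weight (show i ≠ 0 by omega)]
    apply Prod.Lex.right
    simp only [hh, hq, hqd]
    omega
end

-- ===== PRECONDITION & SPEC =====
def Spec_getTrees (weight : Int) (out : Int) : Prop := out = getTrees_alt weight
instance (weight : Int) (out : Int) : Decidable (Spec_getTrees weight out) := by unfold Spec_getTrees; infer_instance

-- ===== CLAIM (what is proved, stated in full; the proofs are below) =====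
def Claim_equal_getTrees : Prop := ∀ (weight : Int), Dom_getTrees weight → Spec_getTrees weight (getTrees weight)

-- ===== LEMMAS AND PROOFS =====

-- splitting an integer-interval sum at b
lemma Icc_split (f : Int → Int) (a b c : Int) (h1 : a ≤ b + 1) (h2 : b ≤ c) :
    ∑ k ∈ Finset.Icc a c, f k
      = ∑ k ∈ Finset.Icc a b, f k + ∑ k ∈ Finset.Icc (b + 1) c, f k := by
  rw [show Finset.Icc a c = Finset.Icc a b ∪ Finset.Icc (b + 1) c from by
    ext x; simp only [Finset.mem_Icc, Finset.mem_union]; omega]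
  exact Finset.sum_union (Finset.disjoint_left.mpr (by
    intro x hx hx'
    simp only [Finset.mem_Icc] at hx hx'
    omega))

-- A's loop sums getTrees (weight // k) over k = i, i-1, ..., 2.
lemma loopA_sum (w : Int) : ∀ n : Nat, ∀ i acc : Int, i.toNat ≤ n →
    getTreesLoopA w i acc = acc + ∑ k ∈ Finset.Icc 2 i, getTrees (PySem.Int.floordiv w k) := by
  intro n
  induction n with
  | zero =>
    intro i acc hi
    rw [getTreesLoopA]
    rw [if_neg (by omega), Finset.Icc_eq_empty (by omega)]
    simp
  | succ n ih =>
    intro i acc hi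
    rw [getTreesLoopA]
    by_cases h : 1 < i
    · rw [if_pos h, ih (i - 1) _ (by omega)]
      have hsplit : ∑ k ∈ Finset.Icc 2 i, getTrees (PySem.Int.floordiv w k)
          = ∑ k ∈ Finset.Icc 2 (i - 1), getTrees (PySem.Int.floordiv w k)
            + getTrees (PySem.Int.floordiv w i) := by
        rw [Icc_split _ 2 (i - 1) i (by omega) (by omega),
          show i - 1 + 1 = i from by omega, Finset.Icc_self, Finset.sum_singleton]
      rw [hsplit]; ring
    · rw [if_neg h, Finset.Icc_eq_empty (by omega)]
      simp

-- the quotient weight // k is constant on a divisor block [i, weight // (weight // i)]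
lemma block_const (w i k : Int) (h2 : 2 ≤ i) (hik : i ≤ k) (hkh : k ≤ w / (w / i))
    (hih : i ≤ w / 2) : w / k = w / i := by
  have hw2 : w / 2 * 2 ≤ w := Int.ediv_mul_le w (by omega)
  have hw4 : 4 ≤ w := by omega
  have hq1 : 1 ≤ w / i := by rw [Int.le_ediv_iff_mul_le (by omega)]; omega
  have hk0 : 0 < k := by omega
  apply le_antisymm
  · -- w / k ≤ w / i  since i ≤ k
    rw [Int.le_ediv_iff_mul_le (by omega)]
    have h5 : 0 ≤ w / k := Int.ediv_nonneg (by omega) (by omega)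
    have h6 : w / k * k ≤ w := Int.ediv_mul_le w (by omega)
    nlinarith
  · -- w / i ≤ w / k  since k ≤ w / (w / i)
    rw [Int.le_ediv_iff_mul_le (by omega)]
    have h7 : k * (w / i) ≤ w := by
      rw [← Int.le_ediv_iff_mul_le (by omega)]
      exact hkh
    nlinarith

-- B's loop sums getTrees_alt (weight // k) over k = i, ..., weight // 2, one block at a time.
lemma loopB_sum (w : Int) : ∀ n : Nat, ∀ i acc : Int, 2 ≤ i → (w / 2 - i + 2).toNat ≤ n →
    getTreesLoopB w i acc
      = acc + ∑ k ∈ Finset.Icc i (w / 2), getTrees_alt (PySem.Int.floordiv w k) := by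
  have hh : PySem.Int.floordiv w 2 = w / 2 := PySem.Int.floordiv_eq_ediv_of_pos (by omega)
  intro n
  induction n with
  | zero =>
    intro i acc h2i hn
    rw [getTreesLoopB, hh, if_neg (by omega), Finset.Icc_eq_empty (by omega)]
    simp
  | succ n ih =>
    intro i acc h2i hn
    rw [getTreesLoopB, hh]
    by_cases hcond : 2 ≤ i ∧ i ≤ w / 2
    · have hq : PySem.Int.floordiv w i = w / i := PySem.Int.floordiv_eq_ediv_of_pos (by omega)
      have hw2 : w / 2 * 2 ≤ w := Int.ediv_mul_le w (by omega)
      have hw4 : 4 ≤ w := by omega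
      have hq1 : 1 ≤ w / i := by rw [Int.le_ediv_iff_mul_le (by omega)]; omega
      have hqd : PySem.Int.floordiv w (w / i) = w / (w / i) :=
        PySem.Int.floordiv_eq_ediv_of_pos (by omega)
      have hji : i ≤ w / (w / i) := by
        rw [Int.le_ediv_iff_mul_le (by omega)]
        nlinarith [Int.ediv_mul_le w (show i ≠ 0 by omega)]
      rw [if_pos hcond]
      simp only [hq, hqd]
      rw [ih (min (w / 2) (w / (w / i)) + 1) _ (by omega) (by omega)]
      rw [Icc_split (fun k => getTrees_alt (PySem.Int.floordiv w k)) i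
        (min (w / 2) (w / (w / i))) (w / 2) (by omega) (by omega)]
      have hconst : ∀ k ∈ Finset.Icc i (min (w / 2) (w / (w / i))),
          getTrees_alt (PySem.Int.floordiv w k) = getTrees_alt (w / i) := by
        intro k hk
        simp only [Finset.mem_Icc] at hk
        have hfk : PySem.Int.floordiv w k = w / k := PySem.Int.floordiv_eq_ediv_of_pos (by omega)
        rw [hfk, block_const w i k hcond.1 hk.1 (by omega) hcond.2]
      rw [Finset.sum_congr rfl hconst, Finset.sum_const, Int.card_Icc, nsmul_eq_mul]
      have hcast : ((min (w / 2) (w / (w / i)) + 1 - i).toNat : Int)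
          = min (w / 2) (w / (w / i)) - i + 1 := by omega
      rw [hcast]
      ring
    · rw [if_neg hcond, Finset.Icc_eq_empty (by omega)]
      simp

lemma key (w : Int) (IH : ∀ v : Int, v.toNat < w.toNat → getTrees v = getTrees_alt v) :
    getTrees w = getTrees_alt w := by
  rw [getTrees, getTrees_alt]
  by_cases h12 : w = 1 ∨ w = 2
  · rw [if_pos h12, if_pos h12]
  · rw [if_neg h12, if_neg h12]
    have hh : PySem.Int.floordiv w 2 = w / 2 := PySem.Int.floordiv_eq_ediv_of_pos (by omega)
    simp only [hh]
    rw [loopA_sum w (w / 2).toNat (w / 2) _ le_rfl,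
      loopB_sum w (w / 2).toNat 2 _ (by omega) (by omega)]
    congr 1
    apply Finset.sum_congr rfl
    intro k hk
    simp only [Finset.mem_Icc] at hk
    have hw2 : w / 2 * 2 ≤ w := Int.ediv_mul_le w (by omega)
    have hw4 : 4 ≤ w := by omega
    have hfk : PySem.Int.floordiv w k = w / k := PySem.Int.floordiv_eq_ediv_of_pos (by omega)
    have h2 : 0 ≤ w / k := Int.ediv_nonneg (by omega) (by omega)
    have h3 : w / k * k ≤ w := Int.ediv_mul_le w (by omega)
    have h4 : 2 * (w / k) ≤ w / k * k := by nlinarith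
    exact IH _ (by omega)

-- ===== VERDICT (by name: the statement is the Claim_ definition above) =====
theorem getTrees_spec : Claim_equal_getTrees := by
  unfold Claim_equal_getTrees
  intro w _
  unfold Spec_getTrees
  have H : ∀ n : Nat, ∀ v : Int, v.toNat ≤ n → getTrees v = getTrees_alt v := by
    intro n
    induction n with
    | zero => exact fun v hv => key v (fun u hu => absurd hu (by omega))
    | succ n ih => exact fun v hv => key v (fun u hu => ih u (by omega))
  exact H w.toNat w le_rfl
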